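-- pv_equiv track=rewrite | github.com/begimayk/Tour-hanoi | PartieA.py | verifier_victoire
-- ===== SOURCE A (Python) =====
-- def verifier_victoire(plateau,n):
--     plateau_copie = list(plateau)
--     destination = plateau_copie.pop()  # signifie la derniere liste dans la liste des listes, plateau.
--     resultat = True
--     if len(destination) == n:
--         for e in range(0,n-1):
--             if destination[e] < destination[e+1]:  # verification de la décroissance
--                 resultat = False
--     else:
--         resultat = False
--     return resultat
-- ===== SOURCE B (Python) =====
-- def verifier_victoire(plateau, n):
--     destination = list(plateau)[-1]
--     return len(destination) == n and destination == sorted(destination, reverse=True)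
-- ===== Notes on version B (the rewrite author's own statement) =====
-- stated objective: simpler
-- what changed: Replaces the index loop over adjacent pairs (with a boolean flag) by comparing the last tower against its descending-sorted copy, which equals the tower exactly when it is non-increasing.
import Mathlib
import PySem

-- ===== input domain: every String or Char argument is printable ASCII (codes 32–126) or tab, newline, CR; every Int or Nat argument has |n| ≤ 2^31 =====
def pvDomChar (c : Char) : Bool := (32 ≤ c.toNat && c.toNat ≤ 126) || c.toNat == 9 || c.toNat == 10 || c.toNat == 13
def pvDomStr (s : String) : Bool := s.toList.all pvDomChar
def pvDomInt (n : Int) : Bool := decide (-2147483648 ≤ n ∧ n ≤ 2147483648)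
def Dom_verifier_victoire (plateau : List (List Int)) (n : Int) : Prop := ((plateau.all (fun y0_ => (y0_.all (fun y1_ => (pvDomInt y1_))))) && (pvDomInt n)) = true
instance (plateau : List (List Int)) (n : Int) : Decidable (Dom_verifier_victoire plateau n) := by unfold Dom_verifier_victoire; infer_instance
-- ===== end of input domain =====

-- B checks the last tower against its descending-sorted copy instead of A's indexed adjacent-pair scan with a flag; same value everywhere A returns (simpler decomposition, no speed claim).

-- ===== PORT A =====
-- Python A: copies plateau, pops the last tower, then an index loop over range(0, n-1)
-- flips a flag on any strictly increasing adjacent pair. destination[e]/destination[e+1]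
-- are always in range inside the `len(destination) == n` branch, so pyGetD is exact there.
def verifier_victoire (plateau : List (List Int)) (n : Int) : Bool :=
  match PySem.List.pop? plateau (-1) with
  | none => false  -- Python raises IndexError here (plateau = []); excluded by Pre_
  | some (destination, _plateau_copie) =>
    if (destination.length : Int) = n then
      (PySem.List.pyRange 0 (n - 1) 1).foldl
        (fun resultat e =>
          if PySem.List.pyGetD destination e 0 < PySem.List.pyGetD destination (e + 1) 0 then
            false
          else
            resultat)
        true
    else
      false

-- ===== PORT B =====
-- Python B: destination = list(plateau)[-1]; len == n and destination equals its
-- descending-sorted copy (sorted(destination, reverse=True), stable).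
def verifier_victoire_alt (plateau : List (List Int)) (n : Int) : Bool :=
  match PySem.List.pyGet? plateau (-1) with
  | none => false  -- Python raises IndexError here (plateau = []); excluded by Pre_
  | some destination =>
    ((destination.length : Int) = n) &&
      (destination = PySem.List.sorted destination (fun x => x) true)

-- ===== PRECONDITION & SPEC =====
-- Pre_ excludes only plateau = [], where both Pythons raise IndexError.
def Pre_verifier_victoire (plateau : List (List Int)) (n : Int) : Prop := plateau ≠ []
instance (plateau : List (List Int)) (n : Int) : Decidable (Pre_verifier_victoire plateau n) := by
  unfold Pre_verifier_victoire; infer_instance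

def pvWitness_verifier_victoire : List (List Int) × Int := ([[3, 2, 1]], 3)

def Spec_verifier_victoire (plateau : List (List Int)) (n : Int) (out : Bool) : Prop := out = verifier_victoire_alt plateau n
instance (plateau : List (List Int)) (n : Int) (out : Bool) : Decidable (Spec_verifier_victoire plateau n out) := by unfold Spec_verifier_victoire; infer_instance

-- ===== CLAIM (what is proved, stated in full; the proofs are below) =====
def Claim_equal_verifier_victoire : Prop := ∀ (plateau : List (List Int)) (n : Int), Dom_verifier_victoire plateau n → Pre_verifier_victoire plateau n → Spec_verifier_victoire plateau n (verifier_victoire plateau n)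

-- ===== LEMMAS AND PROOFS =====

-- A's flag loop: once False, always False; result is True iff no scanned pair violates.
lemma foldl_flag (l : List Int) (p : Int → Prop) [DecidablePred p] (b : Bool) :
    l.foldl (fun r e => if p e then false else r) b = (b && l.all (fun e => !decide (p e))) := by
  induction l generalizing b with
  | nil => simp
  | cons x xs ih =>
    simp only [List.foldl_cons, List.all_cons, ih]
    by_cases h : p x <;> simp [h]

-- One scanned comparison, as a getElem fact (indices in range).
lemma getD_pair (d : List Int) (e : Int) (h0 : 0 ≤ e) (h1 : e + 1 < (d.length : Int)) :
    (PySem.List.pyGetD d e 0 < PySem.List.pyGetD d (e + 1) 0)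
      = (d[e.toNat]'(by omega) < d[e.toNat + 1]'(by omega)) := by
  rw [PySem.List.pyGetD_eq_getElem d 0 h0 (by omega),
      PySem.List.pyGetD_eq_getElem d 0 (by omega) h1]
  have ht : (e + 1).toNat = e.toNat + 1 := by omega
  simp [ht]

-- The scanned-pairs condition over range(0, len d - 1) is exactly Pairwise (· ≥ ·).
lemma scan_iff_pairwise (d : List Int) :
    ((PySem.List.pyRange 0 ((d.length : Int) - 1) 1).all
      (fun e => !decide (PySem.List.pyGetD d e 0 < PySem.List.pyGetD d (e + 1) 0))) = true
    ↔ d.Pairwise (fun a b => b ≤ a) := by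
  haveI : Trans (fun a b : Int => b ≤ a) (fun a b : Int => b ≤ a) (fun a b : Int => b ≤ a) :=
    ⟨fun h1 h2 => le_trans h2 h1⟩
  rw [← List.isChain_iff_pairwise, List.isChain_iff_getElem, List.all_eq_true]
  constructor
  · intro h i hi
    have hmem : ((i : Nat) : Int) ∈ PySem.List.pyRange 0 ((d.length : Int) - 1) 1 := by
      rw [PySem.List.mem_pyRange_one]; omega
    have := h _ hmem
    rw [Bool.not_eq_eq_eq_not, Bool.not_true, decide_eq_false_iff_not,
        getD_pair d _ (by omega) (by omega), not_lt] at this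
    simpa using this
  · intro h e he
    rw [PySem.List.mem_pyRange_one] at he
    rw [Bool.not_eq_eq_eq_not, Bool.not_true, decide_eq_false_iff_not,
        getD_pair d e (by omega) (by omega), not_lt]
    exact h e.toNat (by omega)

-- Non-increasing iff equal to the descending-sorted copy.
lemma pairwise_iff_sorted_rev (d : List Int) :
    d.Pairwise (fun a b => b ≤ a) ↔ d = PySem.List.sorted d (fun x => x) true := by
  constructor
  · intro h
    exact (PySem.List.sorted_rev_eq_self_of_pairwise d (fun x => x) h).symm
  · intro h
    have := PySem.List.sorted_pairwise_rev d (fun x => x)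
    rw [← h] at this
    exact this

-- ===== VERDICT (by name: the statement is the Claim_ definition above) =====
theorem verifier_victoire_spec : Claim_equal_verifier_victoire := by
  intro plateau n _ hpre
  unfold Spec_verifier_victoire verifier_victoire verifier_victoire_alt
  obtain ⟨init, d, rfl⟩ : ∃ init d, plateau = init ++ [d] :=
    ⟨plateau.dropLast, plateau.getLast hpre, (List.dropLast_concat_getLast hpre).symm⟩
  rw [PySem.List.pop?_last, PySem.List.pyGet?_neg_one_append_singleton]
  dsimp only
  by_cases hn : (d.length : Int) = n
  · rw [if_pos hn, decide_eq_true hn, Bool.true_and, ← hn,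
        foldl_flag _ (fun e => PySem.List.pyGetD d e 0 < PySem.List.pyGetD d (e + 1) 0) true,
        Bool.true_and]
    by_cases hs : d = PySem.List.sorted d (fun x => x) true
    · rw [decide_eq_true hs, (scan_iff_pairwise d).mpr ((pairwise_iff_sorted_rev d).mpr hs)]
    · have hp : ¬ d.Pairwise (fun a b => b ≤ a) :=
        fun hpw => hs ((pairwise_iff_sorted_rev d).mp hpw)
      rw [decide_eq_false hs, Bool.eq_false_iff]
      exact fun h => hp ((scan_iff_pairwise d).mp h)
  · rw [if_neg hn]
    simp [hn]
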